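-- pv_equiv track=rewrite | github.com/bubpen/codekata | 프로그래머스/0/120843. 공 던지기/공 던지기.py | solution
-- ===== SOURCE A (Python) =====
-- def solution(numbers, k):
--     n = 0
--     i = 0
--     while n < (k-1):
--         i += 2
--         if i >=len(numbers):
--             i = i - len(numbers)
--         n += 1
--     answer = numbers[i]
--     return answer
-- ===== SOURCE B (Python) =====
-- def solution(numbers, k):
--     steps = k - 1 if k > 1 else 0
--     return numbers[(2 * steps) % len(numbers)]
-- ===== Notes on version B (the rewrite author's own statement) =====
-- stated objective: faster
-- what changed: replaces the k-1-step simulation loop (add 2, wrap by subtracting len) by the closed-form index numbers[2*max(k-1,0) % len(numbers)]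
import Mathlib
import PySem

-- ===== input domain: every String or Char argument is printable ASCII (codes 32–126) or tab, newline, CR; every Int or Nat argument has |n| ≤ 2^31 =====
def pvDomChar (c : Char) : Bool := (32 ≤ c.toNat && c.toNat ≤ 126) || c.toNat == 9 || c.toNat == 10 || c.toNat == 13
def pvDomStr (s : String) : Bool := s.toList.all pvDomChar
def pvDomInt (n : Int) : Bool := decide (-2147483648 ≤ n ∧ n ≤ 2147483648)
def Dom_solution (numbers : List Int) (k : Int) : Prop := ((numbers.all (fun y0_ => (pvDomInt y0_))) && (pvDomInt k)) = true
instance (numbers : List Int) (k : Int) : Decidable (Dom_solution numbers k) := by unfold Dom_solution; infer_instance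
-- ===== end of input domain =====

-- B replaces A's k-1-step simulation loop by the closed-form index 2*max(k-1,0) % len (O(1) vs O(k)).

-- ===== PORT A =====
-- the while loop: state (n, i), runs while n < k-1
def solutionLoop (len km1 n i : Int) : Int :=
  if n < km1 then
    let i' := i + 2
    let i'' := if i' ≥ len then i' - len else i'
    solutionLoop len km1 (n + 1) i''
  else i
termination_by (km1 - n).toNat
decreasing_by omega

def solution (numbers : List Int) (k : Int) : Int :=
  -- numbers[i]; Pre_ guarantees the index is in range, so the default is never used
  PySem.List.pyGetD numbers (solutionLoop numbers.length (k - 1) 0 0) 0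

-- ===== PORT B =====
def solution_alt (numbers : List Int) (k : Int) : Int :=
  let steps := if k > 1 then k - 1 else 0
  PySem.List.pyGetD numbers (PySem.Int.mod (2 * steps) numbers.length) 0

-- ===== PRECONDITION & SPEC =====
-- Pre_ excludes exactly the inputs where A raises IndexError: the empty list (both raise),
-- and a one-element list with k ≥ 2 (A's wrap-around leaves i = 1, out of range).
def Pre_solution (numbers : List Int) (k : Int) : Prop :=
  numbers ≠ [] ∧ (k ≤ 1 ∨ 2 ≤ (numbers.length : Int))
instance (numbers : List Int) (k : Int) : Decidable (Pre_solution numbers k) := by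
  unfold Pre_solution; infer_instance
def pvWitness_solution : List Int × Int := ([1, 2, 3], 2)

def Spec_solution (numbers : List Int) (k : Int) (out : Int) : Prop := out = solution_alt numbers k
instance (numbers : List Int) (k : Int) (out : Int) : Decidable (Spec_solution numbers k out) := by unfold Spec_solution; infer_instance

-- ===== CLAIM =====
def Claim_equal_solution : Prop := ∀ (numbers : List Int) (k : Int), Dom_solution numbers k → Pre_solution numbers k → Spec_solution numbers k (solution numbers k)

-- ===== LEMMAS AND PROOFS =====

-- loop invariant: with len ≥ 2 and 0 ≤ i < len, the loop computes (i + 2·(remaining steps)) mod len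
lemma solutionLoop_eq (m : Nat) : ∀ (len km1 n i : Int), 2 ≤ len → 0 ≤ i → i < len →
    (km1 - n).toNat = m → solutionLoop len km1 n i = (i + 2 * m) % len := by
  induction m with
  | zero =>
    intro len km1 n i hlen hi0 hil hm
    rw [solutionLoop]
    have : ¬ n < km1 := by omega
    simp [this, Int.emod_eq_of_lt hi0 hil]
  | succ m ih =>
    intro len km1 n i hlen hi0 hil hm
    rw [solutionLoop]
    have hn : n < km1 := by omega
    simp only [hn, if_true]
    by_cases hw : i + 2 ≥ len
    · simp only [hw, if_true]
      rw [ih len km1 (n + 1) (i + 2 - len) (by omega) (by omega) (by omega) (by omega)]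
      have : i + 2 - len + 2 * (m : Int) = (i + 2 * (m + 1 : Nat)) - len := by push_cast; ring
      rw [this, Int.sub_emod_right]
    · simp only [hw, if_false]
      rw [ih len km1 (n + 1) (i + 2) (by omega) (by omega) (by omega) (by omega)]
      congr 1
      push_cast; ring

theorem solution_spec : Claim_equal_solution := by
  intro numbers k _ hpre
  obtain ⟨hne, hk⟩ := hpre
  have hlen : (1 : Int) ≤ numbers.length := by
    have : numbers.length ≠ 0 := by simpa using hne
    omega
  unfold Spec_solution solution solution_alt
  congr 1
  by_cases hk1 : k > 1
  · have hlen2 : (2 : Int) ≤ numbers.length := by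
      rcases hk with h | h
      · omega
      · exact h
    rw [solutionLoop_eq (k - 1).toNat numbers.length (k - 1) 0 0 hlen2 le_rfl (by omega) (by omega)]
    simp only [hk1, if_true]
    rw [PySem.Int.mod_eq_emod_of_pos (by omega)]
    congr 1
    omega
  · rw [solutionLoop]
    have : ¬ (0 : Int) < k - 1 := by omega
    simp only [this, if_false, hk1]
    rw [PySem.Int.mod_eq_emod_of_pos (by omega)]
    simp
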